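-- pv_equiv track=rewrite | github.com/johnhuh619/Baekjoon | 프로그래머스/2/150368. 이모티콘 할인행사/이모티콘 할인행사.py | solution
-- ===== SOURCE A (Python) =====
-- from collections import deque
--
-- def solution(users, emoticons):
--     answer = [0, 0] # subscribes, sales
--     num = [10,20,30,40]
--     n = len(emoticons)
--     stack = deque()
--     stack.append((0,[]))
--     while stack:
--         idx, discounts = stack.pop()
--
--         if idx == n:
--             subscribes = 0
--             sales = 0
--             for user_discount, user_limit in users:
--                 tot_cost = 0
--                 for i in range(n):
--                     if discounts[i] >= user_discount:
--                         discounted_price = emoticons[i] * (100 - discounts[i]) // 100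
--                         tot_cost += discounted_price
--                 if tot_cost >= user_limit:
--                     subscribes += 1
--                 else:
--                     sales += tot_cost
--             if subscribes > answer[0]:
--                 answer[0] = subscribes
--                 answer[1] = sales
--             elif subscribes == answer[0] and sales > answer[1]:
--                 answer[1] = sales
--             continue
--
--         for discount in [10, 20, 30, 40]:
--             new_discounts = discounts + [discount]
--             stack.append((idx + 1, new_discounts))
--
--     return answer
-- ===== SOURCE B (Python) =====
-- def solution(users, emoticons):
--     def evaluate(discounts):
--         subscribes = 0
--         sales = 0
--         for user_discount, user_limit in users:
--             tot_cost = sum(e * (100 - d) // 100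
--                            for e, d in zip(emoticons, discounts) if d >= user_discount)
--             if tot_cost >= user_limit:
--                 subscribes += 1
--             else:
--                 sales += tot_cost
--         return (subscribes, sales)
--
--     def best_from(discounts, remaining):
--         if not remaining:
--             return evaluate(discounts)
--         return max(best_from(discounts + [d], remaining[1:]) for d in (10, 20, 30, 40))
--
--     best = max((0, 0), best_from([], emoticons))
--     return [best[0], best[1]]
-- ===== Notes on version B (the rewrite author's own statement) =====
-- stated objective: simpler
-- what changed: Replaced the explicit deque-as-stack DFS with mutable best-answer state by structural recursion over the emoticon list that returns the lexicographic max of (subscribes, sales) over all discount assignments, with a zip-based per-user cost instead of index arithmetic.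
import Mathlib
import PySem

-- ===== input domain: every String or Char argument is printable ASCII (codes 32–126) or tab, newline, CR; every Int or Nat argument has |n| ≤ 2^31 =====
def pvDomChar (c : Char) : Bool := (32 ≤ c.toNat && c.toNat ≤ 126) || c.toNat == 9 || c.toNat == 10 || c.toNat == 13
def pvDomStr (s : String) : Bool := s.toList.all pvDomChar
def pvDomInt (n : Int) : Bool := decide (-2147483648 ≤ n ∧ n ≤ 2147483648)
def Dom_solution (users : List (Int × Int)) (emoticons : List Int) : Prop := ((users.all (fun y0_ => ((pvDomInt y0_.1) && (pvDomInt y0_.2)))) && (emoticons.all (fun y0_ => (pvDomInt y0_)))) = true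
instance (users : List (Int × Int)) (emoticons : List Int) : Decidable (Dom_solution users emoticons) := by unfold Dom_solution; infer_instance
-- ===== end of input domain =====

-- B replaces A's explicit deque-as-stack DFS with structural recursion over the emoticon list,
-- combining leaf evaluations with a lexicographic-max fold; same return value.


-- ===== PORT A =====

-- A's answer-update step ('if subscribes > answer[0] … elif …'), on the answer pair.
def pvUpd (answer sv : Int × Int) : Int × Int :=
  if sv.1 > answer.1 then (sv.1, sv.2)
  else if sv.1 = answer.1 ∧ sv.2 > answer.2 then (answer.1, sv.2)
  else answer

-- A's leaf evaluation: the 'for user_discount, user_limit in users' loop with the inner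
-- 'for i in range(n)' loop.  Indexing is via pyGetD: on every state this is evaluated at,
-- discounts has length n, so the index is always in range and the default is never used.
def pvEvalA (users : List (Int × Int)) (emoticons : List Int) (n : Int) (discounts : List Int) : Int × Int :=
  users.foldl (fun acc u =>
    let tot := (PySem.List.pyRange 0 n 1).foldl (fun tot i =>
      if PySem.List.pyGetD discounts i 0 ≥ u.1 then
        tot + PySem.Int.floordiv (PySem.List.pyGetD emoticons i 0 * (100 - PySem.List.pyGetD discounts i 0)) 100
      else tot) 0
    if tot ≥ u.2 then (acc.1 + 1, acc.2) else (acc.1, acc.2 + tot)) (0, 0)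

-- A's 'while stack' loop; the head of the list is the top of the deque (pop/append at the right).
-- The final 'else' branch (idx > n) is a totality guard only: every entry ever pushed has
-- 0 ≤ idx ≤ n, so Python never reaches that case.
def pvLoopA (users : List (Int × Int)) (emoticons : List Int) (n : Int) :
    List (Int × List Int) → Int × Int → Int × Int
  | [], answer => answer
  | (idx, discounts) :: rest, answer =>
    if idx = n then
      pvLoopA users emoticons n rest (pvUpd answer (pvEvalA users emoticons n discounts))
    else if _h : idx < n then
      pvLoopA users emoticons n
        ((idx + 1, discounts ++ [40]) :: (idx + 1, discounts ++ [30]) ::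
         (idx + 1, discounts ++ [20]) :: (idx + 1, discounts ++ [10]) :: rest) answer
    else
      pvLoopA users emoticons n rest answer
termination_by stack _ => (stack.map (fun e => 5 ^ ((n - e.1).toNat))).sum
decreasing_by
  · simp only [List.map_cons, List.sum_cons]
    have : 0 < 5 ^ ((n - idx).toNat) := pow_pos (by norm_num) _
    omega
  · simp only [List.map_cons, List.sum_cons]
    have hm : (n - idx).toNat = (n - (idx + 1)).toNat + 1 := by omega
    rw [hm, pow_succ]
    have : 0 < 5 ^ ((n - (idx + 1)).toNat) := pow_pos (by norm_num) _
    omega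
  · simp only [List.map_cons, List.sum_cons]
    have : 0 < 5 ^ ((n - idx).toNat) := pow_pos (by norm_num) _
    omega

def solution (users : List (Int × Int)) (emoticons : List Int) : List Int :=
  let n : Int := emoticons.length
  let answer := pvLoopA users emoticons n [(0, [])] (0, 0)
  [answer.1, answer.2]

-- ===== PORT B =====

-- B's per-user discounted cost: sum over zip(emoticons, discounts) of the prices the user buys.
def pvCost (emoticons discounts : List Int) (ud : Int) : Int :=
  (((emoticons.zip discounts).filter (fun ed => ed.2 ≥ ud)).map
    (fun ed => PySem.Int.floordiv (ed.1 * (100 - ed.2)) 100)).sum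

-- B's evaluate(discounts): the (subscribes, sales) pair.
def pvEvalB (users : List (Int × Int)) (emoticons : List Int) (discounts : List Int) : Int × Int :=
  users.foldl (fun acc u =>
    let tot := pvCost emoticons discounts u.1
    if tot ≥ u.2 then (acc.1 + 1, acc.2) else (acc.1, acc.2 + tot)) (0, 0)

-- Python's binary max on (subscribes, sales) pairs: lexicographic, first argument kept on ties.
def pvMax (a b : Int × Int) : Int × Int :=
  if a.1 < b.1 ∨ (a.1 = b.1 ∧ a.2 < b.2) then b else a

-- B's best_from(discounts, remaining): structural recursion over the remaining emoticon list;
-- the 4-way Python max folds its arguments left to right.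
def pvBestFrom (users : List (Int × Int)) (emoticons : List Int) (discounts : List Int) :
    List Int → Int × Int
  | [] => pvEvalB users emoticons discounts
  | _ :: rest =>
    pvMax (pvMax (pvMax (pvBestFrom users emoticons (discounts ++ [10]) rest)
                        (pvBestFrom users emoticons (discounts ++ [20]) rest))
                 (pvBestFrom users emoticons (discounts ++ [30]) rest))
          (pvBestFrom users emoticons (discounts ++ [40]) rest)

def solution_alt (users : List (Int × Int)) (emoticons : List Int) : List Int :=
  let best := pvMax (0, 0) (pvBestFrom users emoticons [] emoticons)
  [best.1, best.2]

-- ===== PRECONDITION & SPEC =====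
def Spec_solution (users : List (Int × Int)) (emoticons : List Int) (out : List Int) : Prop := out = solution_alt users emoticons
instance (users : List (Int × Int)) (emoticons : List Int) (out : List Int) : Decidable (Spec_solution users emoticons out) := by unfold Spec_solution; infer_instance

-- ===== CLAIM (what is proved, stated in full; the proofs are below) =====
def Claim_equal_solution : Prop := ∀ (users : List (Int × Int)) (emoticons : List Int), Dom_solution users emoticons → Spec_solution users emoticons (solution users emoticons)

-- ===== LEMMAS AND PROOFS =====

theorem pvMax_comm (a b : Int × Int) : pvMax a b = pvMax b a := by
  rcases a with ⟨a1, a2⟩; rcases b with ⟨b1, b2⟩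
  simp only [pvMax]
  split_ifs <;> (try rfl) <;> simp only [Prod.mk.injEq] <;> omega

theorem pvMax_assoc (a b c : Int × Int) : pvMax (pvMax a b) c = pvMax a (pvMax b c) := by
  rcases a with ⟨a1, a2⟩; rcases b with ⟨b1, b2⟩; rcases c with ⟨c1, c2⟩
  simp only [pvMax]
  split_ifs <;> (try rfl) <;> simp only [Prod.mk.injEq] <;> omega

theorem pvUpd_eq_pvMax (a s : Int × Int) : pvUpd a s = pvMax a s := by
  rcases a with ⟨a1, a2⟩; rcases s with ⟨s1, s2⟩
  simp only [pvUpd, pvMax]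
  split_ifs <;> (try rfl) <;> simp only [Prod.mk.injEq, true_and, and_true] <;> omega

theorem foldl_pvMax_out : ∀ (l : List (Int × Int)) (a x : Int × Int),
    List.foldl pvMax (pvMax a x) l = pvMax a (List.foldl pvMax x l) := by
  intro l
  induction l with
  | nil => intro a x; rfl
  | cons y ys ih =>
    intro a x
    simp only [List.foldl_cons]
    rw [pvMax_assoc, ih]

theorem foldl_pvMax_perm {l1 l2 : List (Int × Int)} (h : l1.Perm l2) :
    ∀ (a : Int × Int), List.foldl pvMax a l1 = List.foldl pvMax a l2 := by
  induction h with
  | nil => intro a; rfl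
  | cons x _ ih => intro a; simp only [List.foldl_cons]; exact ih _
  | swap x y l =>
    intro a
    simp only [List.foldl_cons]
    rw [pvMax_assoc, pvMax_assoc, pvMax_comm y x]
  | trans _ _ ih1 ih2 => intro a; rw [ih1, ih2]

-- the leaf values in A's (DFS stack) order: children 40, 30, 20, 10
def pvLeavesA (users : List (Int × Int)) (emoticons : List Int) (discounts : List Int) :
    Nat → List (Int × Int)
  | 0 => [pvEvalB users emoticons discounts]
  | k + 1 =>
    pvLeavesA users emoticons (discounts ++ [40]) k ++
    pvLeavesA users emoticons (discounts ++ [30]) k ++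
    pvLeavesA users emoticons (discounts ++ [20]) k ++
    pvLeavesA users emoticons (discounts ++ [10]) k

-- the leaf values in B's order: children 10, 20, 30, 40
def pvLeavesB (users : List (Int × Int)) (emoticons : List Int) (discounts : List Int) :
    Nat → List (Int × Int)
  | 0 => [pvEvalB users emoticons discounts]
  | k + 1 =>
    pvLeavesB users emoticons (discounts ++ [10]) k ++
    pvLeavesB users emoticons (discounts ++ [20]) k ++
    pvLeavesB users emoticons (discounts ++ [30]) k ++
    pvLeavesB users emoticons (discounts ++ [40]) k

theorem leavesA_perm_leavesB (users : List (Int × Int)) (emoticons : List Int) :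
    ∀ (k : Nat) (ds : List Int),
      (pvLeavesA users emoticons ds k).Perm (pvLeavesB users emoticons ds k) := by
  intro k
  induction k with
  | zero => intro ds; exact List.Perm.refl _
  | succ k ih =>
    intro ds
    simp only [pvLeavesA, pvLeavesB]
    have p10 := ih (ds ++ [10]); have p20 := ih (ds ++ [20])
    have p30 := ih (ds ++ [30]); have p40 := ih (ds ++ [40])
    rw [← Multiset.coe_eq_coe] at p10 p20 p30 p40 ⊢
    simp only [← Multiset.coe_add] at *
    rw [p10, p20, p30, p40]
    abel

theorem leavesB_ne_nil (users : List (Int × Int)) (emoticons : List Int) :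
    ∀ (k : Nat) (ds : List Int), pvLeavesB users emoticons ds k ≠ [] := by
  intro k
  induction k with
  | zero => intro ds; simp [pvLeavesB]
  | succ k ih => intro ds; simp [pvLeavesB, ih]

-- nonempty max as B's Python max computes it
def pvMx : List (Int × Int) → Int × Int
  | [] => (0, 0)
  | x :: xs => List.foldl pvMax x xs

theorem pvMx_append {l1 l2 : List (Int × Int)} (h1 : l1 ≠ []) (h2 : l2 ≠ []) :
    pvMx (l1 ++ l2) = pvMax (pvMx l1) (pvMx l2) := by
  rcases l1 with _ | ⟨x, xs⟩
  · exact absurd rfl h1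
  rcases l2 with _ | ⟨y, ys⟩
  · exact absurd rfl h2
  simp only [pvMx, List.cons_append, List.foldl_cons, List.foldl_append]
  rw [foldl_pvMax_out]

theorem foldl_pvMax_eq_pvMx (a : Int × Int) {l : List (Int × Int)} (h : l ≠ []) :
    List.foldl pvMax a l = pvMax a (pvMx l) := by
  rcases l with _ | ⟨x, xs⟩
  · exact absurd rfl h
  simp only [pvMx, List.foldl_cons]
  rw [← foldl_pvMax_out]

theorem bestFrom_eq_pvMx (users : List (Int × Int)) (emoticons : List Int) :
    ∀ (rem ds : List Int),
      pvBestFrom users emoticons ds rem = pvMx (pvLeavesB users emoticons ds rem.length) := by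
  intro rem
  induction rem with
  | nil => intro ds; simp [pvBestFrom, pvLeavesB, pvMx]
  | cons r rest ih =>
    intro ds
    simp only [pvBestFrom, List.length_cons, pvLeavesB]
    rw [pvMx_append (by simp [List.append_eq_nil_iff, leavesB_ne_nil]) (leavesB_ne_nil _ _ _ _),
        pvMx_append (by simp [List.append_eq_nil_iff, leavesB_ne_nil]) (leavesB_ne_nil _ _ _ _),
        pvMx_append (leavesB_ne_nil _ _ _ _) (leavesB_ne_nil _ _ _ _)]
    rw [ih, ih, ih, ih]

theorem pvFoldIf {α : Type} (p : α → Prop) [DecidablePred p] (g : α → Int) :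
    ∀ (l : List α) (a : Int),
      l.foldl (fun t x => if p x then t + g x else t) a
        = a + ((l.filter (fun x => decide (p x))).map g).sum := by
  intro l
  induction l with
  | nil => intro a; simp
  | cons x xs ih =>
    intro a
    by_cases hx : p x <;> simp [hx, ih, add_assoc]

theorem zip_eq_map_range (es : List Int) :
    ∀ (ds : List Int), ds.length = es.length →
      es.zip ds = (List.range es.length).map (fun k => (es.getD k 0, ds.getD k 0)) := by
  induction es with
  | nil => intro ds _; simp
  | cons e es ih =>
    intro ds h
    rcases ds with _ | ⟨d, ds⟩
    · simp at h
    · simp only [List.length_cons] at h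
      simp [List.range_succ_eq_map, List.map_map, Function.comp_def, List.getElem?_cons_succ,
        ih ds (by omega)]

theorem tot_eq (es ds : List Int) (ud : Int) (h : ds.length = es.length) :
    (PySem.List.pyRange 0 (es.length : Int) 1).foldl (fun tot i =>
      if PySem.List.pyGetD ds i 0 ≥ ud then
        tot + PySem.Int.floordiv (PySem.List.pyGetD es i 0 * (100 - PySem.List.pyGetD ds i 0)) 100
      else tot) 0 = pvCost es ds ud := by
  rw [show ((es.length : Int)) = ((es.length : Nat) : Int) from rfl, PySem.List.pyRange_zero_natCast]
  rw [pvFoldIf (fun i => PySem.List.pyGetD ds i 0 ≥ ud)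
        (fun i => PySem.Int.floordiv (PySem.List.pyGetD es i 0 * (100 - PySem.List.pyGetD ds i 0)) 100)]
  rw [List.filter_map, List.map_map]
  unfold pvCost
  rw [zip_eq_map_range es ds h, List.filter_map, List.map_map]
  simp [Function.comp_def, PySem.List.pyGetD_natCast]

theorem evalA_eq_evalB (users : List (Int × Int)) (emoticons discounts : List Int)
    (h : discounts.length = emoticons.length) :
    pvEvalA users emoticons (emoticons.length : Int) discounts = pvEvalB users emoticons discounts := by
  unfold pvEvalA pvEvalB
  congr 1
  funext acc u
  rw [tot_eq emoticons discounts u.1 h]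

theorem loopA_eq (users : List (Int × Int)) (emoticons : List Int) :
    ∀ (μ : Nat) (stack : List (Int × List Int)) (answer : Int × Int),
      (stack.map (fun p => 5 ^ (((emoticons.length : Int) - p.1).toNat))).sum ≤ μ →
      (∀ p ∈ stack, p.1 = (p.2.length : Int) ∧ p.2.length ≤ emoticons.length) →
      pvLoopA users emoticons (emoticons.length : Int) stack answer =
        List.foldl pvMax answer
          (stack.flatMap (fun p => pvLeavesA users emoticons p.2 (emoticons.length - p.2.length))) := by
  intro μ
  induction μ with
  | zero =>
    intro stack answer hμ _
    rcases stack with _ | ⟨p, rest⟩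
    · simp [pvLoopA]
    · exfalso
      simp only [List.map_cons, List.sum_cons] at hμ
      have : 0 < 5 ^ (((emoticons.length : Int) - p.1).toNat) := pow_pos (by norm_num) _
      omega
  | succ μ ih =>
    intro stack answer hμ hinv
    rcases stack with _ | ⟨⟨idx, ds⟩, rest⟩
    · simp [pvLoopA]
    have hhead := hinv (idx, ds) (by simp)
    simp only at hhead
    simp only [List.map_cons, List.sum_cons] at hμ
    by_cases h1 : idx = (emoticons.length : Int)
    · rw [pvLoopA, if_pos h1]
      have hlen : ds.length = emoticons.length := by
        have := hhead.1; omega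
      have hw : 0 < 5 ^ (((emoticons.length : Int) - idx).toNat) := pow_pos (by norm_num) _
      rw [ih rest (pvUpd answer (pvEvalA users emoticons (emoticons.length : Int) ds)) (by omega)
            (fun p hp => hinv p (List.mem_cons_of_mem _ hp))]
      rw [List.flatMap_cons, pvUpd_eq_pvMax, evalA_eq_evalB users emoticons ds hlen]
      simp only [hlen, Nat.sub_self, pvLeavesA, List.singleton_append, List.foldl_cons]
    · by_cases h2 : idx < (emoticons.length : Int)
      · rw [pvLoopA, if_neg h1, dif_pos h2]
        have hdl : ds.length < emoticons.length := by
          have := hhead.1; omega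
        have hm : (((emoticons.length : Int) - idx).toNat)
            = (((emoticons.length : Int) - (idx + 1)).toNat) + 1 := by omega
        have hnew : ∀ d : Int, ((idx + 1, ds ++ [d]) : Int × List Int).1
            = (((ds ++ [d]).length : Int)) ∧ (ds ++ [d]).length ≤ emoticons.length := by
          intro d
          constructor
          · simp [List.length_append]; have := hhead.1; omega
          · simp [List.length_append]; omega
        rw [ih _ _ ?_ ?_]
        · simp only [List.flatMap_cons]
          have hds : emoticons.length - ds.length
              = (emoticons.length - (ds.length + 1)) + 1 := by omega
          have hds' : ∀ d : Int, emoticons.length - (ds ++ [d]).length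
              = emoticons.length - (ds.length + 1) := by
            intro d; simp [List.length_append]
          rw [hds]
          simp only [pvLeavesA, hds']
          simp [List.append_assoc]
        · simp only [List.map_cons, List.sum_cons]
          rw [hm, pow_succ] at hμ
          have hp : 0 < 5 ^ (((emoticons.length : Int) - (idx + 1)).toNat) := pow_pos (by norm_num) _
          omega
        · intro p hp
          rcases List.mem_cons.mp hp with h | hp; · subst h; exact hnew _
          rcases List.mem_cons.mp hp with h | hp; · subst h; exact hnew _
          rcases List.mem_cons.mp hp with h | hp; · subst h; exact hnew _
          rcases List.mem_cons.mp hp with h | hp; · subst h; exact hnew _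
          exact hinv p (List.mem_cons_of_mem _ hp)
      · exfalso
        have h3 := hhead.1
        have h4 := hhead.2
        omega

-- ===== VERDICT (by name: the statement is the Claim_ definition above) =====
theorem solution_spec : Claim_equal_solution := by
  intro users emoticons _
  unfold Spec_solution solution solution_alt
  dsimp only
  rw [loopA_eq users emoticons
        (([( (0 : Int), ([] : List Int))].map (fun p => 5 ^ (((emoticons.length : Int) - p.1).toNat))).sum)
        _ _ le_rfl ?hinv]
  case hinv =>
    intro p hp
    simp only [List.mem_singleton] at hp
    subst hp
    simp
  simp only [List.flatMap_cons, List.flatMap_nil, List.append_nil, List.length_nil, Nat.sub_zero]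
  rw [foldl_pvMax_perm (leavesA_perm_leavesB users emoticons emoticons.length [])]
  rw [foldl_pvMax_eq_pvMx _ (leavesB_ne_nil users emoticons emoticons.length [])]
  rw [bestFrom_eq_pvMx users emoticons emoticons []]
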